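-- pv_equiv track=rewrite | github.com/kaluginpeter/Algorithms_and_structures_tasks | CodeWars/7kyu/Red_Knight.py | red_knight
-- ===== SOURCE A (Python) =====
-- def red_knight(N, P):
--     d = {'White': 'Black', 'Black': 'White'}
--     flag = 'White' if N == 0 else 'Black'
--     N = 0
--     while N < P:
--         P += 1
--         N += 2
--         flag = d[flag]
--     return flag, N
-- ===== SOURCE B (Python) =====
-- def red_knight(N, P):
--     # Closed form: the loop runs exactly max(P, 0) times, ending with N = 2*max(P, 0);
--     # the flag starts at 'White' iff N == 0 and flips once per iteration.
--     k = P if P > 0 else 0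
--     white = (N == 0) == (k % 2 == 0)
--     return ('White' if white else 'Black'), 2 * k
-- ===== Notes on version B (the rewrite author's own statement) =====
-- stated objective: faster
-- what changed: Replaced the while-loop (one iteration per unit of P) with a closed form: k = max(P,0) iterations, result N = 2k and flag determined by the parity of k.
import Mathlib
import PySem

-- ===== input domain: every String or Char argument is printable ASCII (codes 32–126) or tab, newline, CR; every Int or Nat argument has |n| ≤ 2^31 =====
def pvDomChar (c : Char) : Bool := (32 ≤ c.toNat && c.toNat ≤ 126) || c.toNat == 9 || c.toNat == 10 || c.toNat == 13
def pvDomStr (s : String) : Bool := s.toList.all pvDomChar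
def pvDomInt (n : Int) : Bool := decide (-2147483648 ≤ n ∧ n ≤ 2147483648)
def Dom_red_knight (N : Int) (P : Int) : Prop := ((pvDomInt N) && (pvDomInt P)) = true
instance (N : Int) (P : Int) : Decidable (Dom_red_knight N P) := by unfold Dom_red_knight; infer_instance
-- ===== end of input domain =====

-- B replaces A's O(P) while-loop with an O(1) closed form (N = 2*max(P,0), flag by parity of max(P,0)).


-- ===== PORT A =====
-- the dict d = {'White': 'Black', 'Black': 'White'}
def rkDict : PySem.Dict String String :=
  (PySem.Dict.empty.insert "White" "Black").insert "Black" "White"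

-- the while loop of A: while N < P: P += 1; N += 2; flag = d[flag]
def rkLoop (flag : String) (N : Int) (P : Int) : String × Int :=
  if N < P then
    rkLoop (PySem.Dict.getD rkDict flag "") (N + 2) (P + 1)
  else
    (flag, N)
termination_by (P - N).toNat
decreasing_by omega

def red_knight (N : Int) (P : Int) : String × Int :=
  let flag := if N = 0 then "White" else "Black"
  rkLoop flag 0 P

-- ===== PORT B =====
def red_knight_alt (N : Int) (P : Int) : String × Int :=
  let k : Int := if P > 0 then P else 0
  let white : Bool := decide ((N = 0) ↔ (k % 2 = 0))
  ((if white then "White" else "Black"), 2 * k)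

-- ===== PRECONDITION & SPEC =====
def Spec_red_knight (N : Int) (P : Int) (out : String × Int) : Prop := out = red_knight_alt N P
instance (N : Int) (P : Int) (out : String × Int) : Decidable (Spec_red_knight N P out) := by unfold Spec_red_knight; infer_instance

-- ===== CLAIM (what is proved, stated in full; the proofs are below) =====
def Claim_equal_red_knight : Prop := ∀ (N : Int) (P : Int), Dom_red_knight N P → Spec_red_knight N P (red_knight N P)

-- ===== LEMMAS AND PROOFS =====

theorem rkDict_white : PySem.Dict.getD rkDict "White" "" = "Black" := by decide
theorem rkDict_black : PySem.Dict.getD rkDict "Black" "" = "White" := by decide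

-- The loop, started from a White/Black flag, returns the parity-determined flag and n + 2*max(p-n,0).
theorem rkLoop_closed (m : Nat) : ∀ (flag : String) (n p : Int),
    (p - n).toNat = m → (flag = "White" ∨ flag = "Black") →
    rkLoop flag n p =
      ((if (flag = "White") = ((p - n).toNat % 2 = 0) then "White" else "Black"),
        n + 2 * (p - n).toNat) := by
  induction m using Nat.strong_induction_on with
  | _ m ih =>
    intro flag n p hm hf
    rw [rkLoop]
    by_cases h : n < p
    · simp only [if_pos h]
      have hm' : (p + 1 - (n + 2)).toNat = m - 1 := by omega
      have hm1 : 1 ≤ m := by omega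
      have hrec := ih (m - 1) (by omega) (PySem.Dict.getD rkDict flag "") (n + 2) (p + 1) hm'
      rcases hf with hf | hf <;> subst hf
      · rw [rkDict_white] at hrec ⊢
        rw [hrec (Or.inr rfl), hm']
        simp only [Prod.mk.injEq]
        have : (p - n).toNat = m := hm
        constructor
        · simp only [show ¬("Black" = "White") from by decide]
          by_cases he : m % 2 = 0
          · have : ¬ ((m - 1) % 2 = 0) := by omega
            simp [this, he, hm]
          · have : (m - 1) % 2 = 0 := by omega
            simp [this, he, hm]
        · omega
      · rw [rkDict_black] at hrec ⊢
        rw [hrec (Or.inl rfl), hm']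
        simp only [Prod.mk.injEq]
        constructor
        · simp only [show ¬("Black" = "White") from by decide]
          by_cases he : m % 2 = 0
          · have : ¬ ((m - 1) % 2 = 0) := by omega
            simp [this, he, hm]
          · have : (m - 1) % 2 = 0 := by omega
            simp [this, he, hm]
        · omega
    · simp only [if_neg h]
      have h0 : (p - n).toNat = 0 := by omega
      rw [h0]
      rcases hf with hf | hf <;> subst hf <;> simp

-- ===== VERDICT (by name: the statement is the Claim_ definition above) =====
theorem red_knight_spec : Claim_equal_red_knight := by
  unfold Claim_equal_red_knight
  intro N P _
  unfold Spec_red_knight red_knight red_knight_alt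
  simp only []
  by_cases hN : N = 0
  · rw [if_pos hN]
    rw [rkLoop_closed (P - 0).toNat "White" 0 P rfl (Or.inl rfl)]
    by_cases hP : P > 0
    · simp only [if_pos hP, hN]
      have hk : (P - 0).toNat = P.toNat := by omega
      simp only [Prod.mk.injEq]
      constructor
      · by_cases he : P % 2 = 0
        · have : (P - 0).toNat % 2 = 0 := by omega
          simp [he]; omega
        · have : ¬ ((P - 0).toNat % 2 = 0) := by omega
          simp [he]; omega
      · omega
    · simp only [if_neg hP]
      have hk : (P - 0).toNat = 0 := by omega
      rw [hk]
      simp [hN]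
  · rw [if_neg hN]
    rw [rkLoop_closed (P - 0).toNat "Black" 0 P rfl (Or.inr rfl)]
    by_cases hP : P > 0
    · simp only [if_pos hP]
      simp only [Prod.mk.injEq]
      constructor
      · by_cases he : P % 2 = 0
        · have : (P - 0).toNat % 2 = 0 := by omega
          simp [he, hN]; omega
        · have : ¬ ((P - 0).toNat % 2 = 0) := by omega
          simp [he, hN]; omega
      · omega
    · simp only [if_neg hP]
      have hk : (P - 0).toNat = 0 := by omega
      rw [hk]
      simp [hN]
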